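-- pv_equiv track=rewrite | github.com/ChiQianBingYue/brain-practise | algorithm/dynamic-programming/4KeysKeyboard.py | maxA
-- ===== SOURCE A (Python) =====
-- def maxA(N):
--     # write your code here
--     dp = list(range(N+1))
--     for i in range(4, N + 1):
--         prev = i - 3
--         count = 2
--         while prev > 0:
--             dp[i] = max(dp[i], dp[prev] * count)
--             prev -= 1
--             count += 1
--     return dp[-1]
-- ===== SOURCE B (Python) =====
-- _BASE = [0, 1, 2, 3, 4, 5, 6, 9, 12, 16, 20, 27, 36, 48, 64, 81]
--
-- def maxA(N):
--     # Closed form: for N >= 16 the optimum repeats a copy-paste-x4 block every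
--     # 5 keystrokes, so maxA(N) = 4**q * _BASE[11 + r] with q, r = divmod(N-11, 5).
--     if N <= 15:
--         return _BASE[N]
--     q, r = divmod(N - 11, 5)
--     return 4 ** q * _BASE[11 + r]
-- ===== Notes on version B (the rewrite author's own statement) =====
-- stated objective: faster
-- what changed: Replaced the quadratic DP (for each i an inner scan over all earlier copy positions) by a closed form: a 16-entry base table plus the period-5 law maxA(N)=4**((N-11)//5) * base[11+(N-11)%5] for N>15.
import Mathlib
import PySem

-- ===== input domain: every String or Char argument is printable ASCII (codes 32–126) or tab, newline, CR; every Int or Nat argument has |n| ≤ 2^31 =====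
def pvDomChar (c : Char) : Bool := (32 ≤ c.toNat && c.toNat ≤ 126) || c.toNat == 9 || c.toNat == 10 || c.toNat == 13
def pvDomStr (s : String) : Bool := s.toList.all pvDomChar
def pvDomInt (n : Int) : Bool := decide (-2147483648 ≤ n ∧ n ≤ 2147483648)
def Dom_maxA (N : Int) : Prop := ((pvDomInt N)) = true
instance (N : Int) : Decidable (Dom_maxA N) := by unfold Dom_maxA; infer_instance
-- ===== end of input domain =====

-- B replaces A's quadratic DP by a closed form (16-entry table + the period-5 law F(N)=4*F(N-5)); equivalence proved for all N ≥ 0 (A raises IndexError on N < 0).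

-- ===== PORT A =====
-- inner 'while prev > 0' loop of A; dp indices are in range for every call made under Pre_,
-- so the total forms pyGetD/pySetD are exact here.
def maxAinner (dp : List Int) (i prev count : Int) : List Int :=
  if 0 < prev then
    maxAinner
      (PySem.List.pySetD dp i (max (PySem.List.pyGetD dp i 0) (PySem.List.pyGetD dp prev 0 * count)))
      i (prev - 1) (count + 1)
  else dp
termination_by prev.toNat
decreasing_by omega

def maxA (N : Int) : Int :=
  -- dp = list(range(N+1))
  let dp0 := PySem.List.pyRange 0 (N + 1) 1
  -- for i in range(4, N+1): prev = i-3; count = 2; while prev > 0: ...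
  let dp := (PySem.List.pyRange 4 (N + 1) 1).foldl (fun dp i => maxAinner dp i (i - 3) 2) dp0
  -- dp[-1]; IndexError exactly when N < 0 (empty dp) — excluded by Pre_maxA
  PySem.List.pyGetD dp (-1) 0

-- ===== PORT B =====
def pvBase : List Int := [0, 1, 2, 3, 4, 5, 6, 9, 12, 16, 20, 27, 36, 48, 64, 81]

def maxA_alt (N : Int) : Int :=
  if N ≤ 15 then PySem.List.pyGetD pvBase N 0
  else
    let q := PySem.Int.floordiv (N - 11) 5
    let r := PySem.Int.mod (N - 11) 5
    4 ^ q.toNat * PySem.List.pyGetD pvBase (11 + r) 0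

-- ===== PRECONDITION & SPEC =====
-- Pre_ excludes exactly N < 0, where A's dp is empty and dp[-1] raises IndexError.
def Pre_maxA (N : Int) : Prop := 0 ≤ N
instance (N : Int) : Decidable (Pre_maxA N) := by unfold Pre_maxA; infer_instance
def pvWitness_maxA : Int := (7)

def Spec_maxA (N : Int) (out : Int) : Prop := out = maxA_alt N
instance (N : Int) (out : Int) : Decidable (Spec_maxA N out) := by unfold Spec_maxA; infer_instance

-- ===== CLAIM (what is proved, stated in full; the proofs are below) =====
def Claim_equal_maxA : Prop := ∀ (N : Int), Dom_maxA N → Pre_maxA N → Spec_maxA N (maxA N)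

-- ===== LEMMAS AND PROOFS =====

-- the optimal-value function: table up to 15, then F(n) = 4 * F(n-5)
def F : ℕ → ℕ
  | 0 => 0 | 1 => 1 | 2 => 2 | 3 => 3 | 4 => 4 | 5 => 5 | 6 => 6
  | 7 => 9 | 8 => 12 | 9 => 16 | 10 => 20 | 11 => 27 | 12 => 36
  | 13 => 48 | 14 => 64 | 15 => 81
  | n + 16 => 4 * F (n + 11)

theorem F_of_ge (n : ℕ) (h : 16 ≤ n) : F n = 4 * F (n - 5) := by
  obtain ⟨m, rfl⟩ := Nat.exists_eq_add_of_le h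
  rw [show 16 + m = m + 16 from by omega, show m + 16 - 5 = m + 11 from by omega]
  rfl

-- growth inequalities for F, all proved in one strong induction of period 5
theorem Fgrow : ∀ n : ℕ,
    (n ≤ F n) ∧ (2 * F n ≤ F (n + 3)) ∧ (2 ≤ n → F (n + 2) ≤ 2 * F n) ∧
    (7 ≤ n ∧ n ≠ 10 → 3 * F (n + 1) ≤ 4 * F n) ∧ (6 ≤ n → 5 * F n ≤ 4 * F (n + 1)) ∧
    (9 ≤ n → 3 * F n ≤ 2 * F (n + 2)) := by
  intro n
  induction n using Nat.strong_induction_on with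
  | _ n ih =>
    by_cases h : n ≤ 15
    · interval_cases n <;> refine ⟨by decide, by decide, by decide, by decide, by decide, by decide⟩
    · rw [not_le] at h
      have e0 : F n = 4 * F (n - 5) := F_of_ge n (by omega)
      have e1 : F (n + 1) = 4 * F (n - 4) := by
        have := F_of_ge (n + 1) (by omega); rwa [show n + 1 - 5 = n - 4 from by omega] at this
      have e2 : F (n + 2) = 4 * F (n - 3) := by
        have := F_of_ge (n + 2) (by omega); rwa [show n + 2 - 5 = n - 3 from by omega] at this
      have e3 : F (n + 3) = 4 * F (n - 2) := by
        have := F_of_ge (n + 3) (by omega); rwa [show n + 3 - 5 = n - 2 from by omega] at this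
      obtain ⟨i1, i3, i2, i4, i5, i6⟩ := ih (n - 5) (by omega)
      rw [show n - 5 + 3 = n - 2 from by omega] at i3
      rw [show n - 5 + 2 = n - 3 from by omega] at i2 i6
      rw [show n - 5 + 1 = n - 4 from by omega] at i4 i5
      have i2' := i2 (by omega)
      have i4' := i4 ⟨by omega, by omega⟩
      have i5' := i5 (by omega)
      have i6' := i6 (by omega)
      refine ⟨by omega, by omega, fun _ => by omega, fun _ => by omega, fun _ => by omega, fun _ => by omega⟩

theorem F_four_mul_le (n : ℕ) : 4 * F n ≤ F (n + 5) := by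
  by_cases h : n ≤ 10
  · interval_cases n <;> decide
  · rw [F_of_ge (n + 5) (by omega), show n + 5 - 5 = n from by omega]

-- every copy-paste term dp[p]*c is at most F(p+c+1)
theorem F_term_le : ∀ c : ℕ, 2 ≤ c → ∀ p : ℕ, 1 ≤ p → F p * c ≤ F (p + c + 1) := by
  intro c
  induction c using Nat.strong_induction_on with
  | _ c ih =>
    intro hc p hp
    by_cases hc6 : c ≤ 6
    · interval_cases c
      · -- c = 2
        rw [show p + 2 + 1 = p + 3 from by omega]
        have := (Fgrow p).2.1
        omega
      · -- c = 3
        by_cases hp11 : p ≤ 11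
        · interval_cases p <;> decide
        · rw [show p + 3 + 1 = p + 4 from by omega, F_of_ge (p + 4) (by omega),
              show p + 4 - 5 = p - 1 from by omega]
          have := (Fgrow (p - 1)).2.2.2.1 ⟨by omega, by omega⟩
          rw [show p - 1 + 1 = p from by omega] at this
          omega
      · -- c = 4
        have := F_four_mul_le p
        rw [show p + 4 + 1 = p + 5 from by omega]
        omega
      · -- c = 5
        by_cases hp9 : p ≤ 9
        · interval_cases p <;> decide
        · rw [show p + 5 + 1 = p + 6 from by omega, F_of_ge (p + 6) (by omega),
              show p + 6 - 5 = p + 1 from by omega]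
          have := (Fgrow p).2.2.2.2.1 (by omega)
          omega
      · -- c = 6
        by_cases hp8 : p ≤ 8
        · interval_cases p <;> decide
        · rw [show p + 6 + 1 = p + 7 from by omega, F_of_ge (p + 7) (by omega),
              show p + 7 - 5 = p + 2 from by omega]
          have := (Fgrow p).2.2.2.2.2 (by omega)
          omega
    · -- c ≥ 7: reduce to c - 5
      have ihc := ih (c - 5) (by omega) (by omega) p hp
      have l1 := F_four_mul_le (p + c - 4)
      rw [show p + (c - 5) + 1 = p + c - 4 from by omega] at ihc
      rw [show p + c - 4 + 5 = p + c + 1 from by omega] at l1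
      have h1 : F p * c ≤ F p * (4 * (c - 5)) := Nat.mul_le_mul_left _ (by omega)
      have h2 : F p * (4 * (c - 5)) = 4 * (F p * (c - 5)) := by ring
      have h3 : 4 * (F p * (c - 5)) ≤ 4 * F (p + c - 4) := by omega
      omega

-- for m ≥ 7 the optimum is attained by some paste term
theorem F_att (m : ℕ) (h : 7 ≤ m) : ∃ p : ℕ, 1 ≤ p ∧ p ≤ m - 3 ∧ F p * (m - 1 - p) = F m := by
  by_cases h15 : m ≤ 15
  · interval_cases m
    · exact ⟨3, by decide⟩
    · exact ⟨3, by decide⟩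
    · exact ⟨4, by decide⟩
    · exact ⟨4, by decide⟩
    · exact ⟨7, by decide⟩
    · exact ⟨7, by decide⟩
    · exact ⟨8, by decide⟩
    · exact ⟨9, by decide⟩
    · exact ⟨11, by decide⟩
  · refine ⟨m - 5, by omega, by omega, ?_⟩
    rw [show m - 1 - (m - 5) = 4 from by omega, F_of_ge m (by omega)]
    omega

-- pure value computed by A's inner while loop at index i
def innerMax (dp : List Int) : Int → ℕ → Int → Int
  | acc, 0, _ => acc
  | acc, k + 1, count =>
      innerMax dp (max acc (PySem.List.pyGetD dp ((k + 1 : ℕ) : Int) 0 * count)) k (count + 1)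

theorem le_innerMax (dp : List Int) : ∀ (k : ℕ) (count acc : Int), acc ≤ innerMax dp acc k count := by
  intro k
  induction k with
  | zero => intro count acc; exact le_refl _
  | succ k ihk =>
    intro count acc
    exact le_trans (le_max_left _ _) (ihk (count + 1) _)

theorem innerMax_le (dp : List Int) : ∀ (k : ℕ) (count acc B : Int), acc ≤ B →
    (∀ j : ℕ, 1 ≤ j → j ≤ k → PySem.List.pyGetD dp (j : Int) 0 * (count + ((k : Int) - (j : Int))) ≤ B) →
    innerMax dp acc k count ≤ B := by
  intro k
  induction k with
  | zero => intro count acc B hacc _; exact hacc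
  | succ k ihk =>
    intro count acc B hacc hterm
    refine ihk (count + 1) _ B (max_le hacc ?_) ?_
    · have := hterm (k + 1) (by omega) (le_refl _)
      simpa using this
    · intro j hj1 hjk
      have := hterm j hj1 (by omega)
      have he : count + ((k : Int) + 1 - (j : Int)) = count + 1 + ((k : Int) - (j : Int)) := by ring
      rw [Nat.cast_add, Nat.cast_one, he] at this
      exact this

theorem term_le_innerMax (dp : List Int) : ∀ (k : ℕ) (count acc : Int) (j : ℕ), 1 ≤ j → j ≤ k →
    PySem.List.pyGetD dp (j : Int) 0 * (count + ((k : Int) - (j : Int))) ≤ innerMax dp acc k count := by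
  intro k
  induction k with
  | zero => intro count acc j hj1 hj0; omega
  | succ k ihk =>
    intro count acc j hj1 hjk
    by_cases hj : j = k + 1
    · subst hj
      have h1 : PySem.List.pyGetD dp ((k + 1 : ℕ) : Int) 0 * (count + (((k + 1 : ℕ) : Int) - ((k + 1 : ℕ) : Int)))
          = PySem.List.pyGetD dp ((k + 1 : ℕ) : Int) 0 * count := by ring
      rw [h1]
      exact le_trans (le_max_right acc _) (le_innerMax dp k (count + 1) _)
    · have := ihk (count + 1) (max acc (PySem.List.pyGetD dp ((k + 1 : ℕ) : Int) 0 * count)) j hj1 (by omega)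
      have he : count + (((k + 1 : ℕ) : Int) - (j : Int)) = count + 1 + ((k : Int) - (j : Int)) := by
        push_cast; ring
      rw [he]
      exact this

theorem set_getD_self (l : List Int) (m : ℕ) (_h : m < l.length) : l.set m (l.getD m 0) = l := by
  apply List.ext_getElem (by simp)
  intro i h1 h2
  rw [List.getElem_set]
  split
  · next h' => subst h'; exact (List.getD_eq_getElem l 0 h2).symm ▸ rfl
  · rfl

theorem innerMax_congr (dp dp' : List Int) : ∀ (k : ℕ) (acc count : Int),
    (∀ j : ℕ, 1 ≤ j → j ≤ k → PySem.List.pyGetD dp' (j : Int) 0 = PySem.List.pyGetD dp (j : Int) 0) →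
    innerMax dp' acc k count = innerMax dp acc k count := by
  intro k
  induction k with
  | zero => intro acc count _; rfl
  | succ k ihk =>
    intro acc count hj
    show innerMax dp' (max acc (PySem.List.pyGetD dp' ((k + 1 : ℕ) : Int) 0 * count)) k (count + 1)
        = innerMax dp (max acc (PySem.List.pyGetD dp ((k + 1 : ℕ) : Int) 0 * count)) k (count + 1)
    rw [hj (k + 1) (by omega) (le_refl _)]
    exact ihk _ _ (fun j h1 h2 => hj j h1 (by omega))

theorem maxAinner_eq (m : ℕ) : ∀ (k : ℕ) (dp : List Int), m < dp.length → k < m → ∀ count : Int,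
    maxAinner dp (m : Int) (k : Int) count
      = PySem.List.pySetD dp (m : Int) (innerMax dp (PySem.List.pyGetD dp (m : Int) 0) k count) := by
  intro k
  induction k with
  | zero =>
    intro dp hlen hkm count
    rw [maxAinner]
    rw [if_neg (by omega)]
    show dp = PySem.List.pySetD dp (m : Int) (PySem.List.pyGetD dp (m : Int) 0)
    rw [PySem.List.pySetD_natCast, PySem.List.pyGetD_natCast, set_getD_self dp m hlen]
  | succ k ihk =>
    intro dp hlen hkm count
    rw [maxAinner]
    rw [if_pos (by exact_mod_cast Nat.succ_pos k)]
    rw [show ((k + 1 : ℕ) : Int) - 1 = ((k : ℕ) : Int) from by push_cast; ring]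
    have hlen' : m < (PySem.List.pySetD dp (m : Int)
        (max (PySem.List.pyGetD dp (m : Int) 0) (PySem.List.pyGetD dp ((k + 1 : ℕ) : Int) 0 * count))).length := by
      rw [PySem.List.pySetD_natCast]; simpa using hlen
    rw [ihk _ hlen' (by omega) (count + 1)]
    have hv : PySem.List.pyGetD (PySem.List.pySetD dp (m : Int)
        (max (PySem.List.pyGetD dp (m : Int) 0) (PySem.List.pyGetD dp ((k + 1 : ℕ) : Int) 0 * count))) (m : Int) 0
        = max (PySem.List.pyGetD dp (m : Int) 0) (PySem.List.pyGetD dp ((k + 1 : ℕ) : Int) 0 * count) := by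
      rw [PySem.List.pyGetD_pySetD_natCast dp m m _ _ hlen]
      simp
    rw [hv]
    have hcongr : innerMax (PySem.List.pySetD dp (m : Int)
          (max (PySem.List.pyGetD dp (m : Int) 0) (PySem.List.pyGetD dp ((k + 1 : ℕ) : Int) 0 * count)))
          (max (PySem.List.pyGetD dp (m : Int) 0) (PySem.List.pyGetD dp ((k + 1 : ℕ) : Int) 0 * count)) k (count + 1)
        = innerMax dp
          (max (PySem.List.pyGetD dp (m : Int) 0) (PySem.List.pyGetD dp ((k + 1 : ℕ) : Int) 0 * count)) k (count + 1) := by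
      apply innerMax_congr
      intro j h1 h2
      rw [PySem.List.pyGetD_pySetD_natCast dp m j _ _ hlen]
      rw [if_neg (by omega)]
    rw [hcongr]
    rw [PySem.List.pySetD_natCast, PySem.List.pySetD_natCast, List.set_set,
        PySem.List.pySetD_natCast]
    rfl

theorem innerMax_eq_F (dp : List Int) (m : ℕ) (h4 : 4 ≤ m)
    (hget : ∀ j : ℕ, 1 ≤ j → j ≤ m - 3 → PySem.List.pyGetD dp (j : Int) 0 = (F j : Int)) :
    innerMax dp ((m : ℕ) : Int) (m - 3) 2 = (F m : Int) := by
  apply le_antisymm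
  · refine innerMax_le dp (m - 3) 2 _ _ ?_ ?_
    · exact_mod_cast (Fgrow m).1
    · intro j hj1 hj2
      rw [hget j hj1 hj2]
      have hterm := F_term_le (m - 1 - j) (by omega) j hj1
      rw [show j + (m - 1 - j) + 1 = m from by omega] at hterm
      rw [show (2 : Int) + (((m - 3 : ℕ) : Int) - (j : Int)) = ((m - 1 - j : ℕ) : Int) from by omega]
      exact_mod_cast hterm
  · by_cases h7 : m ≤ 6
    · have hFm : F m = m := by interval_cases m <;> rfl
      rw [hFm]
      exact le_innerMax dp _ _ _
    · obtain ⟨p, hp1, hp2, hp3⟩ := F_att m (by omega)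
      have hterm := term_le_innerMax dp (m - 3) 2 ((m : ℕ) : Int) p hp1 hp2
      rw [hget p hp1 hp2] at hterm
      rw [show (2 : Int) + (((m - 3 : ℕ) : Int) - (p : Int)) = ((m - 1 - p : ℕ) : Int) from by omega] at hterm
      rw [← hp3]
      push_cast
      exact hterm

-- state of A's dp list after the outer loop has processed i = 4 .. m-1
def dpState (n m : ℕ) : List Int := (List.range (n + 1)).map (fun j => ((if j < m then F j else j : ℕ) : Int))

theorem dpState_length (n m : ℕ) : (dpState n m).length = n + 1 := by
  simp [dpState]

theorem dpState_getElem (n m i : ℕ) (hi : i < (dpState n m).length) :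
    (dpState n m)[i] = ((if i < m then F i else i : ℕ) : Int) := by
  simp [dpState]

theorem dpState_getD (n m j : ℕ) (hj : j ≤ n) :
    PySem.List.pyGetD (dpState n m) (j : Int) 0 = ((if j < m then F j else j : ℕ) : Int) := by
  rw [PySem.List.pyGetD_natCast,
      List.getD_eq_getElem _ 0 (by rw [dpState_length]; omega),
      dpState_getElem n m j (by rw [dpState_length]; omega)]

theorem outer_step (n m : ℕ) (h4 : 4 ≤ m) (hm : m ≤ n) :
    maxAinner (dpState n m) (m : Int) ((m : Int) - 3) 2 = dpState n (m + 1) := by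
  rw [show (m : Int) - 3 = ((m - 3 : ℕ) : Int) from by omega]
  rw [maxAinner_eq m (m - 3) (dpState n m) (by rw [dpState_length]; omega) (by omega) 2]
  rw [dpState_getD n m m (by omega), if_neg (lt_irrefl m)]
  rw [innerMax_eq_F (dpState n m) m h4 ?_]
  · rw [PySem.List.pySetD_natCast]
    apply List.ext_getElem (by rw [List.length_set, dpState_length, dpState_length])
    intro i h1 h2
    rw [List.getElem_set, dpState_getElem n (m + 1) i h2]
    split
    · next h' => subst h'; rw [if_pos (by omega)]
    · next h' =>
      rw [dpState_getElem n m i (by rw [dpState_length] at *; omega)]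
      by_cases him : i < m
      · rw [if_pos him, if_pos (by omega)]
      · rw [if_neg him, if_neg (by omega)]
  · intro j hj1 hj2
    rw [dpState_getD n m j (by omega), if_pos (by omega)]

theorem outer_fold (n : ℕ) : ∀ (M : ℕ), 4 ≤ M → M ≤ n + 1 →
    (PySem.List.pyRange 4 (M : Int) 1).foldl (fun dp i => maxAinner dp i (i - 3) 2) (dpState n 4)
      = dpState n M := by
  intro M hM4
  induction M, hM4 using Nat.le_induction with
  | base =>
    intro _
    rw [show ((4 : ℕ) : Int) = (4 : Int) from by norm_num,
        PySem.List.pyRange_one_eq_nil (by omega)]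
    rfl
  | succ M hM ih =>
    intro hMn
    rw [show ((M + 1 : ℕ) : Int) = (M : Int) + 1 from by push_cast; ring,
        PySem.List.pyRange_one_succ_right (by omega : (4 : Int) ≤ (M : Int)),
        List.foldl_append, ih (by omega)]
    simp only [List.foldl_cons, List.foldl_nil]
    exact outer_step n M hM (by omega)

theorem init_eq (n : ℕ) : PySem.List.pyRange 0 ((n : Int) + 1) 1 = dpState n 4 := by
  rw [PySem.List.pyRange_one, show (((n : Int) + 1) - 0).toNat = n + 1 from by omega]
  apply List.map_congr_left
  intro j hj
  rw [List.mem_range] at hj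
  by_cases hj4 : j < 4
  · rw [if_pos hj4]; interval_cases j <;> decide
  · rw [if_neg hj4]; simp

theorem maxA_eq (n : ℕ) : maxA (n : Int) = (F n : Int) := by
  by_cases h3 : n ≤ 2
  · interval_cases n <;> decide
  · show PySem.List.pyGetD
        ((PySem.List.pyRange 4 ((n : Int) + 1) 1).foldl (fun dp i => maxAinner dp i (i - 3) 2)
          (PySem.List.pyRange 0 ((n : Int) + 1) 1)) (-1) 0 = (F n : Int)
    rw [init_eq n, show ((n : Int) + 1) = ((n + 1 : ℕ) : Int) from by push_cast; ring,
        outer_fold n (n + 1) (by omega) (le_refl _)]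
    have hne : dpState n (n + 1) ≠ [] := by
      intro h
      have := dpState_length n (n + 1)
      rw [h] at this
      simp at this
    rw [PySem.List.pyGetD_neg_one (dpState n (n + 1)) 0 hne, List.getLast_eq_getElem,
        dpState_getElem n (n + 1) _ (by rw [dpState_length]; omega)]
    rw [show (dpState n (n + 1)).length - 1 = n from by rw [dpState_length]; omega]
    rw [if_pos (by omega)]

theorem alt_eq (n : ℕ) : maxA_alt (n : Int) = (F n : Int) := by
  induction n using Nat.strong_induction_on with
  | _ n ih =>
    by_cases h20 : n ≤ 20
    · interval_cases n <;> decide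
    · have ih5 := ih (n - 5) (by omega)
      have hq : ((n : Int) - 11) / 5 = (((n - 5 : ℕ) : Int) - 11) / 5 + 1 := by omega
      have hr : ((n : Int) - 11) % 5 = (((n - 5 : ℕ) : Int) - 11) % 5 := by omega
      have h0 : 0 ≤ (((n - 5 : ℕ) : Int) - 11) / 5 := by omega
      calc maxA_alt (n : Int)
          = 4 * maxA_alt ((n - 5 : ℕ) : Int) := by
            show (if (n : Int) ≤ 15 then PySem.List.pyGetD pvBase (n : Int) 0
                else 4 ^ (PySem.Int.floordiv ((n : Int) - 11) 5).toNat *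
                  PySem.List.pyGetD pvBase (11 + PySem.Int.mod ((n : Int) - 11) 5) 0)
              = 4 * (if ((n - 5 : ℕ) : Int) ≤ 15 then PySem.List.pyGetD pvBase ((n - 5 : ℕ) : Int) 0
                else 4 ^ (PySem.Int.floordiv (((n - 5 : ℕ) : Int) - 11) 5).toNat *
                  PySem.List.pyGetD pvBase (11 + PySem.Int.mod (((n - 5 : ℕ) : Int) - 11) 5) 0)
            rw [if_neg (by omega), if_neg (by omega)]
            rw [PySem.Int.floordiv_eq_ediv_of_pos (by norm_num),
                PySem.Int.floordiv_eq_ediv_of_pos (by norm_num),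
                PySem.Int.mod_eq_emod_of_pos (by norm_num),
                PySem.Int.mod_eq_emod_of_pos (by norm_num),
                hq, hr,
                show ((((n - 5 : ℕ) : Int) - 11) / 5 + 1).toNat
                    = ((((n - 5 : ℕ) : Int) - 11) / 5).toNat + 1 from by omega,
                pow_succ]
            ring
        _ = 4 * ((F (n - 5) : ℕ) : Int) := by rw [ih5]
        _ = (F n : Int) := by rw [F_of_ge n (by omega)]; push_cast; ring

-- ===== VERDICT (by name: the statement is the Claim_ definition above) =====
theorem maxA_spec : Claim_equal_maxA := by
  intro N _ hPre
  unfold Spec_maxA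
  have h0 : (0 : Int) ≤ N := hPre
  have hN : N = ((N.toNat : ℕ) : Int) := by omega
  rw [hN, maxA_eq, alt_eq]
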